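-- pv_equiv track=rewrite | github.com/GiantClam/shpitto_tools | asset-factory/pipelines/llm_filler.py | _rank_gallery_images
-- ===== SOURCE A (Python) =====
-- def _slugify(value: str) -> str:
--     return "".join(ch.lower() if ch.isalnum() else "-" for ch in value).strip("-")
--
-- def _normalize_tokens(value: str) -> list[str]:
--     if not value:
--         return []
--     return [token for token in _slugify(value).split("-") if token]
--
-- def _rank_gallery_images(label: str, images: list[dict]) -> list[dict]:
--     if not images:
--         return []
--     label_tokens = set(_normalize_tokens(label))
--     scored: list[tuple[int, int, dict]] = []
--     for idx, item in enumerate(images):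
--         src = item.get("src")
--         if not isinstance(src, str) or not src.strip():
--             continue
--         haystack = f"{item.get('alt') or ''} {src}"
--         score = len(label_tokens.intersection(_normalize_tokens(haystack)))
--         scored.append((score, idx, item))
--     scored.sort(key=lambda entry: (-entry[0], entry[1]))
--     ranked = [item for score, _, item in scored if score > 0]
--     if ranked:
--         return ranked
--     return [item for _, _, item in scored]
-- ===== SOURCE B (Python) =====
-- def _slugify(value: str) -> str:
--     return "".join(ch.lower() if ch.isalnum() else "-" for ch in value).strip("-")
--
-- def _normalize_tokens(value: str) -> list[str]:
--     if not value:
--         return []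
--     return [token for token in _slugify(value).split("-") if token]
--
-- def _rank_gallery_images(label: str, images: list[dict]) -> list[dict]:
--     label_tokens = set(_normalize_tokens(label))
--     pairs = []
--     for item in images:
--         src = item.get("src")
--         if not isinstance(src, str) or not src.strip():
--             continue
--         haystack = f"{item.get('alt') or ''} {src}"
--         pairs.append((len(label_tokens.intersection(_normalize_tokens(haystack))), item))
--     if not pairs:
--         return []
--     mx = max(s for s, _ in pairs)
--     if mx == 0:
--         return [item for _, item in pairs]
--     return [item for s in range(mx, 0, -1) for sc, item in pairs if sc == s]
-- ===== Notes on version B (the rewrite author's own statement) =====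
-- stated objective: alternative
-- what changed: B replaces A's stable comparison sort over (-score, idx) tuples by computing the maximum score once and then selecting items bucket-wise, iterating scores from the maximum down to 1 (original order within each score), with the all-items-in-order fallback when the maximum score is 0.
import Mathlib
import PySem

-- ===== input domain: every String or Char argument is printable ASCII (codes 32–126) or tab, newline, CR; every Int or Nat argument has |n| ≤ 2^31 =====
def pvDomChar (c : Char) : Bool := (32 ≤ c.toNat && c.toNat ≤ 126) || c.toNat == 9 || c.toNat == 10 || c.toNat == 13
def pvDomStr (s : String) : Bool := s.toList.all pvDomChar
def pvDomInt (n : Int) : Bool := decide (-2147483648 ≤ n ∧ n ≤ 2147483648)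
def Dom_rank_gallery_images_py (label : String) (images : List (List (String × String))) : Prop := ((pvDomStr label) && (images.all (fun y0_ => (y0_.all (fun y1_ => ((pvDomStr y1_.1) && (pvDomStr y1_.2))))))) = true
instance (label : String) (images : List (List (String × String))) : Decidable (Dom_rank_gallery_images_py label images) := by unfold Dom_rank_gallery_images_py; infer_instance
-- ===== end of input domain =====

-- B replaces A's comparison sort over (-score, idx) keys by a single max computation plus
-- score-descending bucket selection (repeated filter); alternative algorithm, same result.

-- ===== PORT A =====
-- shared module helpers _slugify / _normalize_tokens (identical in Source A and Source B)
def pvSlugify (value : String) : String :=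
  PySem.Str.stripChars
    (PySem.Str.join "" (value.toList.map
      (fun ch => if PySem.Chars.isalnum ch then PySem.Str.lower (String.ofList [ch]) else "-")))
    "-"

def pvNormalizeTokens (value : String) : List String :=
  if value = "" then []
  else ((PySem.Str.split? (pvSlugify value) "-").getD []).filter (fun token => token ≠ "")

-- the per-item score expression, identical in A's and B's loop bodies:
-- len(label_tokens.intersection(_normalize_tokens(f"{item.get('alt') or ''} {src}")))
def pvScore (labelTokens : PySem.Set String) (item : List (String × String)) (src : String) : Int :=
  PySem.Set.len (PySem.Set.inter labelTokens
    (pvNormalizeTokens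
      ((match PySem.Dict.get? (PySem.Dict.mk item) "alt" with
        | none => ""
        | some a => if a = "" then "" else a) ++ " " ++ src)))

def rank_gallery_images_py (label : String) (images : List (List (String × String))) : List (List (String × String)) :=
  if images = [] then []
  else
    let labelTokens := PySem.Set.ofList (pvNormalizeTokens label)
    let scored := (PySem.List.enumerate images 0).foldl
      (fun acc p =>
        match PySem.Dict.get? (PySem.Dict.mk p.2) "src" with
        | none => acc
        | some src =>
          if PySem.Str.strip src = "" then acc
          else acc ++ [(pvScore labelTokens p.2 src, p.1, p.2)]) []
    let sortedL := PySem.List.sorted2 scored (fun e => -e.1) (fun e => e.2.1) false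
    let ranked := (sortedL.filter (fun e => decide (0 < e.1))).map (fun e => e.2.2)
    if ranked ≠ [] then ranked else sortedL.map (fun e => e.2.2)

-- ===== PORT B =====
def rank_gallery_images_py_alt (label : String) (images : List (List (String × String))) : List (List (String × String)) :=
  let labelTokens := PySem.Set.ofList (pvNormalizeTokens label)
  let pairs := images.foldl
    (fun acc item =>
      match PySem.Dict.get? (PySem.Dict.mk item) "src" with
      | none => acc
      | some src =>
        if PySem.Str.strip src = "" then acc
        else acc ++ [(pvScore labelTokens item src, item)]) []
  match pairs with
  | [] => []
  | p :: rest =>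
    let mx := (rest.map (fun q => q.1)).foldl max p.1
    if mx = 0 then pairs.map (fun q => q.2)
    else (PySem.List.pyRange mx 0 (-1)).flatMap
      (fun s => (pairs.filter (fun q => decide (q.1 = s))).map (fun q => q.2))

-- ===== PRECONDITION & SPEC =====
def Spec_rank_gallery_images_py (label : String) (images : List (List (String × String))) (out : List (List (String × String))) : Prop := out = rank_gallery_images_py_alt label images
instance (label : String) (images : List (List (String × String))) (out : List (List (String × String))) : Decidable (Spec_rank_gallery_images_py label images out) := by unfold Spec_rank_gallery_images_py; infer_instance

-- ===== CLAIM (what is proved, stated in full; the proofs are below) =====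
def Claim_equal_rank_gallery_images_py : Prop := ∀ (label : String) (images : List (List (String × String))), Dom_rank_gallery_images_py label images → Spec_rank_gallery_images_py label images (rank_gallery_images_py label images)

-- ===== LEMMAS AND PROOFS =====

-- the comparison used inside sorted2 with k1 = -score, k2 = idx
def pvBefore (a b : Int × Int × List (String × String)) : Bool :=
  decide (-a.1 < -b.1) || (!decide (-b.1 < -a.1) && decide (a.2.1 < b.2.1))

theorem pvBefore_iff (a b : Int × Int × List (String × String)) :
    pvBefore a b = true ↔ (-a.1 < -b.1 ∨ (¬(-b.1 < -a.1) ∧ a.2.1 < b.2.1)) := by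
  simp [pvBefore]

theorem pvBefore_asym {a b : Int × Int × List (String × String)}
    (h : pvBefore a b = true) : pvBefore b a = false := by
  rw [pvBefore_iff] at h
  rw [← Bool.not_eq_true, pvBefore_iff]
  omega

theorem pvBefore_trans {a b c : Int × Int × List (String × String)}
    (h1 : pvBefore a b = true) (h2 : pvBefore b c = true) : pvBefore a c = true := by
  rw [pvBefore_iff] at h1 h2 ⊢
  omega

theorem pvInsert_pairwise (x : Int × Int × List (String × String))
    (acc : List (Int × Int × List (String × String)))
    (h : acc.Pairwise (fun a b => pvBefore b a = false)) :
    (PySem.List.insertBy pvBefore x acc).Pairwise (fun a b => pvBefore b a = false) := by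
  induction acc with
  | nil => simp [PySem.List.insertBy]
  | cons y ys ih =>
    rw [List.pairwise_cons] at h
    obtain ⟨hy, hys⟩ := h
    by_cases hxy : pvBefore x y = true
    · rw [show PySem.List.insertBy pvBefore x (y :: ys) = x :: y :: ys by
        simp [PySem.List.insertBy, hxy]]
      refine List.Pairwise.cons ?_ (List.Pairwise.cons hy hys)
      intro z hz
      rcases List.mem_cons.mp hz with rfl | hz'
      · exact pvBefore_asym hxy
      · by_contra hc
        have hzx : pvBefore z x = true := by revert hc; cases pvBefore z x <;> simp
        have h1 := pvBefore_trans hzx hxy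
        have h2 := hy z hz'
        rw [h2] at h1; exact Bool.false_ne_true h1
    · rw [show PySem.List.insertBy pvBefore x (y :: ys)
          = y :: PySem.List.insertBy pvBefore x ys by simp [PySem.List.insertBy, hxy]]
      refine List.Pairwise.cons ?_ (ih hys)
      intro z hz
      rcases (PySem.List.mem_insertBy pvBefore x z ys).mp hz with rfl | hz'
      · simpa using hxy
      · exact hy z hz'

theorem pvFoldl_insert_pairwise (l acc : List (Int × Int × List (String × String)))
    (h : acc.Pairwise (fun a b => pvBefore b a = false)) :
    (l.foldl (fun acc x => PySem.List.insertBy pvBefore x acc) acc).Pairwise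
      (fun a b => pvBefore b a = false) := by
  induction l generalizing acc with
  | nil => exact h
  | cons y t ih => exact ih _ (pvInsert_pairwise y acc h)

-- the valid-item extractors of the two loops
def pvF (labelTokens : PySem.Set String) (p : Int × List (String × String)) :
    Option (Int × Int × List (String × String)) :=
  match PySem.Dict.get? (PySem.Dict.mk p.2) "src" with
  | none => none
  | some src =>
    if PySem.Str.strip src = "" then none
    else some (pvScore labelTokens p.2 src, p.1, p.2)

def pvG (labelTokens : PySem.Set String) (item : List (String × String)) :
    Option (Int × List (String × String)) :=
  match PySem.Dict.get? (PySem.Dict.mk item) "src" with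
  | none => none
  | some src =>
    if PySem.Str.strip src = "" then none
    else some (pvScore labelTokens item src, item)

theorem pvFoldA_eq (lt : PySem.Set String) (l : List (Int × List (String × String)))
    (acc : List (Int × Int × List (String × String))) :
    l.foldl (fun acc p =>
      match PySem.Dict.get? (PySem.Dict.mk p.2) "src" with
      | none => acc
      | some src =>
        if PySem.Str.strip src = "" then acc
        else acc ++ [(pvScore lt p.2 src, p.1, p.2)]) acc
      = acc ++ l.filterMap (pvF lt) := by
  induction l generalizing acc with
  | nil => simp
  | cons x t ih =>
    rw [List.foldl_cons, ih]
    cases hsrc : PySem.Dict.get? (PySem.Dict.mk x.2) "src" with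
    | none => simp [pvF, hsrc]
    | some src => by_cases hs : PySem.Str.strip src = "" <;> simp [pvF, hsrc, hs]

theorem pvFoldB_eq (lt : PySem.Set String) (l : List (List (String × String)))
    (acc : List (Int × List (String × String))) :
    l.foldl (fun acc item =>
      match PySem.Dict.get? (PySem.Dict.mk item) "src" with
      | none => acc
      | some src =>
        if PySem.Str.strip src = "" then acc
        else acc ++ [(pvScore lt item src, item)]) acc
      = acc ++ l.filterMap (pvG lt) := by
  induction l generalizing acc with
  | nil => simp
  | cons x t ih =>
    rw [List.foldl_cons, ih]
    cases hsrc : PySem.Dict.get? (PySem.Dict.mk x) "src" with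
    | none => simp [pvG, hsrc]
    | some src => by_cases hs : PySem.Str.strip src = "" <;> simp [pvG, hsrc, hs]

theorem pvF_eq_G (lt : PySem.Set String) (p : Int × List (String × String)) :
    pvF lt p = (pvG lt p.2).map (fun q => (q.1, p.1, q.2)) := by
  unfold pvF pvG
  cases PySem.Dict.get? (PySem.Dict.mk p.2) "src" with
  | none => rfl
  | some src => by_cases hs : PySem.Str.strip src = "" <;> simp [hs]

theorem pvF_idx (lt : PySem.Set String) (p : Int × List (String × String))
    (e : Int × Int × List (String × String)) (h : pvF lt p = some e) : e.2.1 = p.1 := by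
  unfold pvF at h
  cases hsrc : PySem.Dict.get? (PySem.Dict.mk p.2) "src" with
  | none => rw [hsrc] at h; cases h
  | some src =>
    rw [hsrc] at h
    by_cases hs : PySem.Str.strip src = ""
    · simp [hs] at h
    · simp [hs] at h
      subst h; rfl

theorem pvF_score (lt : PySem.Set String) (p : Int × List (String × String))
    (e : Int × Int × List (String × String)) (h : pvF lt p = some e) : 0 ≤ e.1 := by
  unfold pvF at h
  cases hsrc : PySem.Dict.get? (PySem.Dict.mk p.2) "src" with
  | none => rw [hsrc] at h; cases h
  | some src =>
    rw [hsrc] at h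
    by_cases hs : PySem.Str.strip src = ""
    · simp [hs] at h
    · simp [hs] at h
      subst h
      simp [pvScore, PySem.Set.len]

theorem pvEnum_cons (x : List (String × String)) (t : List (List (String × String))) (s : Int) :
    PySem.List.enumerate (x :: t) s = (s, x) :: PySem.List.enumerate t (s + 1) := rfl

theorem pvProj_scored (lt : PySem.Set String) (l : List (List (String × String))) (s : Int) :
    ((PySem.List.enumerate l s).filterMap (pvF lt)).map (fun e => (e.1, e.2.2))
      = l.filterMap (pvG lt) := by
  induction l generalizing s with
  | nil => rfl
  | cons x t ih =>
    rw [pvEnum_cons, List.filterMap_cons, List.filterMap_cons]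
    cases hg : pvG lt x with
    | none =>
      have hf : pvF lt (s, x) = none := by rw [pvF_eq_G]; simp [hg]
      rw [hf]; exact ih (s + 1)
    | some q =>
      have hf : pvF lt (s, x) = some (q.1, s, q.2) := by rw [pvF_eq_G]; simp [hg]
      rw [hf, List.map_cons, ih (s + 1)]

theorem pvIdx_lb (lt : PySem.Set String) (l : List (List (String × String))) (s : Int) :
    ∀ e ∈ (PySem.List.enumerate l s).filterMap (pvF lt), s ≤ e.2.1 := by
  induction l generalizing s with
  | nil => intro e he; simp [PySem.List.enumerate] at he
  | cons x t ih =>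
    intro e he
    rw [pvEnum_cons, List.filterMap_cons] at he
    cases hf : pvF lt (s, x) with
    | none => rw [hf] at he; exact (ih (s + 1) e he).trans' (by omega)
    | some v =>
      rw [hf] at he
      rcases List.mem_cons.mp he with rfl | he'
      · rw [pvF_idx lt _ _ hf]
      · have := ih (s + 1) e he'; omega

theorem pvIdx_pairwise (lt : PySem.Set String) (l : List (List (String × String))) (s : Int) :
    ((PySem.List.enumerate l s).filterMap (pvF lt)).Pairwise (fun a b => a.2.1 < b.2.1) := by
  induction l generalizing s with
  | nil => simp [PySem.List.enumerate]
  | cons x t ih =>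
    rw [pvEnum_cons, List.filterMap_cons]
    cases hf : pvF lt (s, x) with
    | none => exact ih (s + 1)
    | some v =>
      refine List.Pairwise.cons ?_ (ih (s + 1))
      intro b hb
      have hb1 := pvIdx_lb lt t (s + 1) b hb
      have hv := pvF_idx lt _ _ hf
      omega

theorem pvScore_nonneg (lt : PySem.Set String) (l : List (List (String × String))) (s : Int) :
    ∀ e ∈ (PySem.List.enumerate l s).filterMap (pvF lt), 0 ≤ e.1 := by
  intro e he
  obtain ⟨p, _, hf⟩ := List.mem_filterMap.mp he
  exact pvF_score lt p e hf

theorem pvCount_buckets (r : List Int) (hr : r.Nodup)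
    (S : List (Int × Int × List (String × String))) (x : Int × Int × List (String × String)) :
    (r.flatMap (fun s => S.filter (fun e => decide (e.1 = s)))).count x
      = if x.1 ∈ r then S.count x else 0 := by
  induction r with
  | nil => simp
  | cons s rest ih =>
    rw [List.flatMap_cons, List.count_append, ih (List.Nodup.of_cons hr)]
    by_cases hx : x.1 = s
    · have hxr : x.1 ∉ rest := by rw [hx]; exact (List.nodup_cons.mp hr).1
      rw [List.count_filter (by simp [hx])]
      rw [if_neg hxr, if_pos (by simp [hx])]
      omega
    · have hnm : x ∉ S.filter (fun e => decide (e.1 = s)) := by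
        intro hm; exact hx (by simpa using (List.mem_filter.mp hm).2)
      rw [List.count_eq_zero.mpr hnm]
      simp [hx]

theorem pvNodup_range_desc (a b : Int) : (PySem.List.pyRange a b (-1)).Nodup := by
  rw [PySem.List.pyRange_neg_one]
  refine List.Nodup.map ?_ (List.nodup_range)
  intro k1 k2 h
  simp only at h
  omega

theorem pvRange_desc_pairwise (a b : Int) :
    (PySem.List.pyRange a b (-1)).Pairwise (fun x y => y < x) := by
  rw [PySem.List.pyRange_neg_one]
  rw [List.pairwise_map]
  refine List.Pairwise.imp ?_ List.pairwise_lt_range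
  intro k1 k2 h
  dsimp only
  omega

theorem pvBuckets_perm (mx : Int) (S : List (Int × Int × List (String × String)))
    (hb : ∀ e ∈ S, 0 ≤ e.1 ∧ e.1 ≤ mx) :
    ((PySem.List.pyRange mx (-1) (-1)).flatMap
      (fun s => S.filter (fun e => decide (e.1 = s)))).Perm S := by
  rw [List.perm_iff_count]
  intro x
  rw [pvCount_buckets _ (pvNodup_range_desc mx (-1)) S x]
  by_cases hxr : x.1 ∈ PySem.List.pyRange mx (-1) (-1)
  · simp [hxr]
  · have hxS : x ∉ S := by
      intro hm
      exact hxr (PySem.List.mem_pyRange_neg_one.mpr (by have := hb x hm; omega))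
    rw [if_neg hxr, List.count_eq_zero.mpr hxS]

theorem pvBuckets_pairwise (S : List (Int × Int × List (String × String)))
    (hidx : S.Pairwise (fun a b => a.2.1 < b.2.1)) (r : List Int)
    (hr : r.Pairwise (fun a b => b < a)) :
    (r.flatMap (fun s => S.filter (fun e => decide (e.1 = s)))).Pairwise
      (fun a b => pvBefore a b = true) := by
  induction r with
  | nil => simp
  | cons s rest ih =>
    rw [List.pairwise_cons] at hr
    rw [List.flatMap_cons, List.pairwise_append]
    refine ⟨?_, ih hr.2, ?_⟩
    · refine (hidx.filter _).imp_of_mem ?_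
      intro a b ha hb hab
      have ha1 : a.1 = s := by simpa using (List.mem_filter.mp ha).2
      have hb1 : b.1 = s := by simpa using (List.mem_filter.mp hb).2
      rw [pvBefore_iff]; omega
    · intro a ha b hb
      have ha1 : a.1 = s := by simpa using (List.mem_filter.mp ha).2
      obtain ⟨s', hs', hb'⟩ := List.mem_flatMap.mp hb
      have hb1 : b.1 = s' := by simpa using (List.mem_filter.mp hb').2
      have hlt : s' < s := hr.1 s' hs'
      rw [pvBefore_iff]; omega

theorem pvSorted_eq_buckets (mx : Int) (S : List (Int × Int × List (String × String)))
    (hidx : S.Pairwise (fun a b => a.2.1 < b.2.1))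
    (hb : ∀ e ∈ S, 0 ≤ e.1 ∧ e.1 ≤ mx) :
    PySem.List.sorted2 S (fun e => -e.1) (fun e => e.2.1) false
      = (PySem.List.pyRange mx (-1) (-1)).flatMap
          (fun s => S.filter (fun e => decide (e.1 = s))) := by
  have hperm := pvBuckets_perm mx S hb
  have hsp : (PySem.List.sorted2 S (fun e => -e.1) (fun e => e.2.1) false).Perm S :=
    PySem.List.sorted2_perm S _ _ false
  have hsort_pw : (PySem.List.sorted2 S (fun e => -e.1) (fun e => e.2.1) false).Pairwise
      (fun a b => pvBefore b a = false) := by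
    have heq : PySem.List.sorted2 S (fun e => -e.1) (fun e => e.2.1) false
        = S.foldl (fun acc x => PySem.List.insertBy pvBefore x acc) [] := rfl
    rw [heq]
    exact pvFoldl_insert_pairwise S [] List.Pairwise.nil
  have hb_pw : ((PySem.List.pyRange mx (-1) (-1)).flatMap
      (fun s => S.filter (fun e => decide (e.1 = s)))).Pairwise
      (fun a b => pvBefore b a = false) :=
    (pvBuckets_pairwise S hidx _ (pvRange_desc_pairwise mx (-1))).imp
      (fun h => pvBefore_asym h)
  have hnd : (S.map (fun e => e.2.1)).Nodup := by
    exact (List.pairwise_map.mpr hidx).imp (fun h => ne_of_lt h)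
  have hinj : ∀ a ∈ S, ∀ b ∈ S, a.2.1 = b.2.1 → a = b := by
    intro a ha b hb' h
    exact List.inj_on_of_nodup_map hnd ha hb' h
  refine List.eq_of_perm_of_sorted ?_ hsort_pw hb_pw (hsp.trans hperm.symm)
  intro a b ha hb' h1 h2
  have haS : a ∈ S := hsp.mem_iff.mp ha
  have hbS : b ∈ S := hperm.mem_iff.mp hb'
  have e1 : ¬ (pvBefore a b = true) := by rw [h2]; simp
  have e2 : ¬ (pvBefore b a = true) := by rw [h1]; simp
  rw [pvBefore_iff] at e1 e2
  exact hinj a haS b hbS (by omega)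

theorem pvFilter_flatMap {α β : Type} (r : List α) (g : α → List β) (q : β → Bool) :
    (r.flatMap g).filter q = r.flatMap (fun s => (g s).filter q) := by
  induction r with
  | nil => rfl
  | cons s rest ih => rw [List.flatMap_cons, List.flatMap_cons, List.filter_append, ih]

theorem pvSplit_range (mx : Int) (h : 0 < mx) :
    PySem.List.pyRange mx (-1) (-1) = PySem.List.pyRange mx 0 (-1) ++ [(0 : Int)] := by
  rw [PySem.List.pyRange_neg_one, PySem.List.pyRange_neg_one]
  rw [show (mx - (-1)).toNat = (mx - 0).toNat + 1 by omega]
  rw [List.range_succ, List.map_append]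
  congr 1
  simp
  omega

-- ===== VERDICT (by name: the statement is the Claim_ definition above) =====
theorem rank_gallery_images_py_spec : Claim_equal_rank_gallery_images_py := by
  intro label images _
  unfold Spec_rank_gallery_images_py
  by_cases himg : images = []
  · subst himg; rfl
  simp only [rank_gallery_images_py, rank_gallery_images_py_alt]
  rw [if_neg himg]
  rw [pvFoldA_eq, pvFoldB_eq, List.nil_append, List.nil_append]
  have hproj := pvProj_scored (PySem.Set.ofList (pvNormalizeTokens label)) images 0
  have hidx := pvIdx_pairwise (PySem.Set.ofList (pvNormalizeTokens label)) images 0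
  have hpos := pvScore_nonneg (PySem.Set.ofList (pvNormalizeTokens label)) images 0
  cases hP : images.filterMap (pvG (PySem.Set.ofList (pvNormalizeTokens label))) with
  | nil =>
    have hS0 : (PySem.List.enumerate images 0).filterMap
        (pvF (PySem.Set.ofList (pvNormalizeTokens label))) = [] := by
      rw [hP] at hproj
      exact List.map_eq_nil_iff.mp hproj
    rw [hS0]
    rfl
  | cons p rest =>
    rw [hP] at hproj
    dsimp only
    generalize hmxe : (rest.map (fun q => q.1)).foldl max p.1 = mx
    have hup : ∀ q ∈ p :: rest, q.1 ≤ mx := by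
      intro q hq
      have h1 := PySem.List.le_foldl_max (rest.map (fun q => q.1)) p.1
      rw [hmxe] at h1
      rcases List.mem_cons.mp hq with rfl | hq'
      · exact h1.1
      · exact h1.2 q.1 (List.mem_map_of_mem hq')
    have hmem : ∃ q ∈ p :: rest, q.1 = mx := by
      have h1 := PySem.List.foldl_max_mem (rest.map (fun q => q.1)) p.1
      rw [hmxe] at h1
      rcases h1 with h1 | h1
      · exact ⟨p, List.mem_cons_self, h1.symm⟩
      · obtain ⟨q, hq, hq1⟩ := List.mem_map.mp h1
        exact ⟨q, List.mem_cons_of_mem _ hq, hq1⟩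
    have hbounds : ∀ e ∈ (PySem.List.enumerate images 0).filterMap
        (pvF (PySem.Set.ofList (pvNormalizeTokens label))), 0 ≤ e.1 ∧ e.1 ≤ mx := by
      intro e he
      refine ⟨hpos e he, ?_⟩
      have hm : (e.1, e.2.2) ∈ p :: rest := by
        rw [← hproj]
        exact List.mem_map_of_mem he
      exact hup _ hm
    have hmx0 : 0 ≤ mx := by
      obtain ⟨q, hq, hq1⟩ := hmem
      rw [← hproj] at hq
      obtain ⟨e, he, he2⟩ := List.mem_map.mp hq
      have := hpos e he
      have : e.1 = q.1 := by rw [← he2]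
      omega
    rw [pvSorted_eq_buckets mx _ hidx hbounds]
    by_cases hmxz : mx = 0
    · subst hmxz
      rw [if_pos rfl]
      have hr0 : PySem.List.pyRange 0 (-1) (-1) = [(0 : Int)] := by decide
      rw [hr0]
      simp only [List.flatMap_cons, List.flatMap_nil, List.append_nil]
      have hfe : ((PySem.List.enumerate images 0).filterMap
          (pvF (PySem.Set.ofList (pvNormalizeTokens label)))).filter
            (fun e => decide (e.1 = (0 : Int)))
          = (PySem.List.enumerate images 0).filterMap
            (pvF (PySem.Set.ofList (pvNormalizeTokens label))) := by
        refine List.filter_eq_self.mpr ?_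
        intro e he
        have := hbounds e he
        simp only [decide_eq_true_eq]
        omega
      rw [hfe]
      have hrk : ((PySem.List.enumerate images 0).filterMap
          (pvF (PySem.Set.ofList (pvNormalizeTokens label)))).filter
            (fun e => decide (0 < e.1)) = [] := by
        refine List.filter_eq_nil_iff.mpr ?_
        intro e he
        have := hbounds e he
        simp only [decide_eq_true_eq]
        omega
      rw [hrk]
      rw [List.map_nil, if_neg (by simp)]
      rw [← hproj, List.map_map]
      rfl
    · have hmxpos : 0 < mx := by omega
      rw [if_neg hmxz]
      rw [pvSplit_range mx hmxpos, List.flatMap_append]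
      simp only [List.flatMap_cons, List.flatMap_nil, List.append_nil]
      rw [List.filter_append, pvFilter_flatMap]
      have hY : (((PySem.List.enumerate images 0).filterMap
          (pvF (PySem.Set.ofList (pvNormalizeTokens label)))).filter
            (fun e => decide (e.1 = (0 : Int)))).filter (fun e => decide (0 < e.1)) = [] := by
        refine List.filter_eq_nil_iff.mpr ?_
        intro e he
        have : e.1 = 0 := by simpa using (List.mem_filter.mp he).2
        simp only [decide_eq_true_eq]
        omega
      rw [hY, List.append_nil]
      have hX : (PySem.List.pyRange mx 0 (-1)).flatMap
          (fun s => (((PySem.List.enumerate images 0).filterMap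
            (pvF (PySem.Set.ofList (pvNormalizeTokens label)))).filter
              (fun e => decide (e.1 = s))).filter (fun e => decide (0 < e.1)))
          = (PySem.List.pyRange mx 0 (-1)).flatMap
            (fun s => ((PySem.List.enumerate images 0).filterMap
              (pvF (PySem.Set.ofList (pvNormalizeTokens label)))).filter
                (fun e => decide (e.1 = s))) := by
        rw [List.flatMap_def, List.flatMap_def]
        congr 1
        refine List.map_congr_left ?_
        intro s hs
        have hspos : 0 < s := (PySem.List.mem_pyRange_neg_one.mp hs).1
        refine List.filter_eq_self.mpr ?_
        intro e he
        have : e.1 = s := by simpa using (List.mem_filter.mp he).2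
        simp only [decide_eq_true_eq]
        omega
      rw [hX]
      have hne : (((PySem.List.pyRange mx 0 (-1)).flatMap
          (fun s => ((PySem.List.enumerate images 0).filterMap
            (pvF (PySem.Set.ofList (pvNormalizeTokens label)))).filter
              (fun e => decide (e.1 = s)))).map (fun e => e.2.2)) ≠ [] := by
        obtain ⟨q, hq, hq1⟩ := hmem
        rw [← hproj] at hq
        obtain ⟨e, he, he2⟩ := List.mem_map.mp hq
        have he1 : e.1 = mx := by
          have : (e.1, e.2.2).1 = q.1 := by rw [he2]
          simpa [hq1] using this
        refine List.ne_nil_of_mem (a := e.2.2) ?_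
        refine List.mem_map.mpr ⟨e, ?_, rfl⟩
        refine List.mem_flatMap.mpr ⟨mx, ?_, ?_⟩
        · exact PySem.List.mem_pyRange_neg_one.mpr ⟨hmxpos, le_refl mx⟩
        · exact List.mem_filter.mpr ⟨he, by simp [he1]⟩
      rw [if_pos hne]
      rw [← hproj]
      simp only [List.map_flatMap, List.filter_map, List.map_map]
      rfl
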